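-- pv_equiv track=rewrite | github.com/alexballera/laboratorio-fcen | clases/Clase-01-PythonPandas/practica01/ejercicios-preliminares.py | mezclar
-- ===== SOURCE A (Python) =====
-- def mezclar(cadena1, cadena2):
--     res = ''
--     letra_cadena_1 = 0
--     long_cadena_1 = len(cadena1)
--     long_cadena_2 = len(cadena2)
--
--     if long_cadena_1 > long_cadena_2:
--         cadena2 += ' ' * (long_cadena_1 - long_cadena_2)
--
--     if long_cadena_1 < long_cadena_2:
--         cadena1 += ' ' * (long_cadena_2 - long_cadena_1)
--
--     for i in cadena1:
--         res += i + cadena2[letra_cadena_1]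
--         letra_cadena_1 += 1
--
--     res_sin_espacios = ''
--
--     for i in res:
--         if i != ' ':
--             res_sin_espacios += i
--     return res_sin_espacios
-- ===== SOURCE B (Python) =====
-- def mezclar(cadena1, cadena2):
--     out = []
--     for i in range(max(len(cadena1), len(cadena2))):
--         if i < len(cadena1):
--             c = cadena1[i]
--             if c != ' ':
--                 out.append(c)
--         if i < len(cadena2):
--             c = cadena2[i]
--             if c != ' ':
--                 out.append(c)
--     return ''.join(out)
-- ===== Notes on version B (the rewrite author's own statement) =====
-- stated objective: simpler
-- what changed: B drops A's pad-with-spaces preprocessing and fuses A's two sequential passes (interleave-build, then space-filter) into one index loop that emits only non-space characters directly into a list joined once.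
import Mathlib
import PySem

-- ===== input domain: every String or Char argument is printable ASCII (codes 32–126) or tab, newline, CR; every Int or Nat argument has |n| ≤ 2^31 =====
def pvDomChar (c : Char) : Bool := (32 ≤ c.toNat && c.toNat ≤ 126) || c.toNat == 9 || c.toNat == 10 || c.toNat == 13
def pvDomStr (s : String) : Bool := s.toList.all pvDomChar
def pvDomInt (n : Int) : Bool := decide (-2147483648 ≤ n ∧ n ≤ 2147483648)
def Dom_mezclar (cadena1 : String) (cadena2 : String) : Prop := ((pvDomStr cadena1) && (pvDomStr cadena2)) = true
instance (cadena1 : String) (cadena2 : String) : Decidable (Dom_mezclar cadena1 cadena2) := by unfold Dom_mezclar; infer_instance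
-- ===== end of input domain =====

-- B removes A's space-padding step and fuses A's interleave pass and space-filter pass
-- into a single index loop (objective: simpler). Both programs are total.


-- ===== PORT A =====
-- Literal transliteration of A. res is accumulated as List Char (Python string
-- concatenation). cadena2[letra_cadena_1] is ported with pyGetD: after A's padding the
-- two strings have equal length, so the index is always in range and pyGetD is exact there.
def mezclar (cadena1 : String) (cadena2 : String) : String :=
  let long_cadena_1 : Int := cadena1.toList.length
  let long_cadena_2 : Int := cadena2.toList.length
  let cadena2' : List Char :=
    if long_cadena_1 > long_cadena_2 then
      cadena2.toList ++ List.replicate (long_cadena_1 - long_cadena_2).toNat ' '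
    else cadena2.toList
  let cadena1' : List Char :=
    if long_cadena_1 < long_cadena_2 then
      cadena1.toList ++ List.replicate (long_cadena_2 - long_cadena_1).toNat ' '
    else cadena1.toList
  let st := cadena1'.foldl
    (fun (st : List Char × Int) i =>
      (st.1 ++ [i, PySem.List.pyGetD cadena2' st.2 ' '], st.2 + 1))
    (([] : List Char), (0 : Int))
  let res := st.1
  let res_sin_espacios := res.foldl
    (fun acc i => if i ≠ ' ' then acc ++ [i] else acc) ([] : List Char)
  String.mk res_sin_espacios

-- ===== PORT B =====
-- Literal transliteration of Source B: one loop over range(max(len1,len2)); at each index,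
-- append cadena1[i] then cadena2[i] when present and ≠ ' '; join once at the end.
def mezclar_alt (cadena1 : String) (cadena2 : String) : String :=
  let l1 := cadena1.toList
  let l2 := cadena2.toList
  let out := (PySem.List.pyRange 0 (max l1.length l2.length : Nat) 1).foldl
    (fun (out : List Char) i =>
      let out :=
        if i < (l1.length : Int) then
          let c := PySem.List.pyGetD l1 i ' '
          if c ≠ ' ' then out ++ [c] else out
        else out
      if i < (l2.length : Int) then
        let c := PySem.List.pyGetD l2 i ' '
        if c ≠ ' ' then out ++ [c] else out
      else out)
    ([] : List Char)
  String.mk out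

-- ===== PRECONDITION & SPEC =====
def Spec_mezclar (cadena1 : String) (cadena2 : String) (out : String) : Prop := out = mezclar_alt cadena1 cadena2
instance (cadena1 : String) (cadena2 : String) (out : String) : Decidable (Spec_mezclar cadena1 cadena2 out) := by unfold Spec_mezclar; infer_instance

-- ===== CLAIM (what is proved, stated in full; the proofs are below) =====
def Claim_equal_mezclar : Prop := ∀ (cadena1 : String) (cadena2 : String), Dom_mezclar cadena1 cadena2 → Spec_mezclar cadena1 cadena2 (mezclar cadena1 cadena2)

-- ===== LEMMAS AND PROOFS =====

-- zip-longest interleave of two character lists (reference function for both proofs)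
def itl : List Char → List Char → List Char
  | [], [] => []
  | [], y :: ys => y :: itl [] ys
  | x :: xs, [] => x :: itl xs []
  | x :: xs, y :: ys => x :: y :: itl xs ys

-- filter out spaces
def fsp (l : List Char) : List Char := l.filter (· ≠ ' ')

-- A's interleave as actually computed: second-list misses become the pyGetD default ' '
def itlA : List Char → List Char → List Char
  | [], _ => []
  | x :: xs, [] => x :: ' ' :: itlA xs []
  | x :: xs, y :: ys => x :: y :: itlA xs ys

-- zip-longest interleave with nothing on the left is the right list
theorem itl_nil_left : ∀ (ys : List Char), itl [] ys = ys
  | [] => by simp [itl]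
  | y :: ys => by rw [itl, itl_nil_left ys]

theorem fsp_cons (x : Char) (l : List Char) :
    fsp (x :: l) = (if x ≠ ' ' then [x] else []) ++ fsp l := by
  simp [fsp, List.filter_cons]; split <;> simp_all

-- A's interleave loop, generalized over the running index
theorem loopA (l2 : List Char) : ∀ (xs : List Char) (k : ℕ) (acc : List Char),
    (xs.foldl (fun (st : List Char × Int) i =>
        (st.1 ++ [i, PySem.List.pyGetD l2 st.2 ' '], st.2 + 1)) (acc, (k : Int))).1
      = acc ++ itlA xs (l2.drop k) := by
  intro xs
  induction xs with
  | nil => intro k acc; simp [itlA]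
  | cons x xs ih =>
    intro k acc
    have hcast : (k : Int) + 1 = ((k + 1 : ℕ) : Int) := by push_cast; ring
    simp only [List.foldl_cons, hcast, ih]
    by_cases hk : k < l2.length
    · have hd : l2.drop k = l2[k] :: l2.drop (k + 1) := List.drop_eq_getElem_cons hk
      have hg : PySem.List.pyGetD l2 (k : Int) ' ' = l2[k] := by
        rw [PySem.List.pyGetD_natCast]; exact List.getD_eq_getElem l2 ' ' hk
      rw [hd, hg, itlA]; simp
    · have hd : l2.drop k = [] := List.drop_eq_nil_of_le (by omega)
      have hd' : l2.drop (k + 1) = [] := List.drop_eq_nil_of_le (by omega)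
      have hg : PySem.List.pyGetD l2 (k : Int) ' ' = ' ' := by
        rw [PySem.List.pyGetD_natCast]; exact List.getD_eq_default l2 ' ' (by omega)
      rw [hd, hd', hg, itlA]; simp

-- interleaving spaces with spaces filters to nothing
theorem L0 : ∀ (n m : ℕ), fsp (itlA (List.replicate n ' ') (List.replicate m ' ')) = [] := by
  intro n
  induction n with
  | zero => intro m; simp [itlA, fsp]
  | succ n ih =>
    intro m
    cases m with
    | zero => simp only [List.replicate_succ, itlA, fsp_cons]; simpa [fsp_cons] using ih 0
    | succ m => simp only [List.replicate_succ, itlA, fsp_cons]; simpa [fsp_cons] using ih m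

-- spaces on the left interleaved with a padded right list filter to the right list's filter
theorem L1 : ∀ (ys : List Char) (n m : ℕ), n = ys.length + m →
    fsp (itlA (List.replicate n ' ') (ys ++ List.replicate m ' ')) = fsp ys := by
  intro ys
  induction ys with
  | nil =>
    intro n m h
    simp only [List.length_nil, Nat.zero_add] at h
    subst h
    rw [List.nil_append, L0]
    simp [fsp]
  | cons y ys ih =>
    intro n m h
    simp only [List.length_cons] at h
    obtain ⟨n', rfl⟩ : ∃ n', n = n' + 1 := ⟨ys.length + m, by omega⟩
    simp only [List.replicate_succ, List.cons_append, itlA, fsp_cons]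
    rw [ih n' m (by omega)]
    simp [fsp_cons]

-- the padded itlA-interleave filters to the unpadded zip-longest interleave's filter
theorem L2 : ∀ (xs ys : List Char) (n m : ℕ), xs.length + n = ys.length + m →
    n = 0 ∨ m = 0 →
    fsp (itlA (xs ++ List.replicate n ' ') (ys ++ List.replicate m ' ')) = fsp (itl xs ys) := by
  intro xs
  induction xs with
  | nil =>
    intro ys n m h _
    rw [List.nil_append, L1 ys n m (by simpa using h), itl_nil_left]
  | cons x xs ih =>
    intro ys n m h hnm
    cases ys with
    | cons y ys =>
      simp only [List.cons_append, itlA, itl, fsp_cons]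
      rw [ih ys n m (by simp at h ⊢; omega) hnm]
    | nil =>
      simp only [List.length_cons, List.length_nil, Nat.zero_add] at h
      have hn : n = 0 := by
        rcases hnm with h0 | h0
        · exact h0
        · omega
      subst hn
      obtain ⟨m', rfl⟩ : ∃ m', m = m' + 1 := ⟨m - 1, by omega⟩
      have key : fsp (itlA xs (List.replicate m' ' ')) = fsp (itl xs []) := by
        have h2 := ih [] 0 m' (by simp; omega) (Or.inl rfl)
        simpa using h2
      simp only [List.replicate_zero, List.append_nil, List.nil_append, List.replicate_succ]
      rw [itlA, itl, fsp_cons, fsp_cons, fsp_cons, key]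
      simp

-- cons-step facts about the filtered interleave, used by B's loop lemma
theorem fsp_itl_cons_cons (x y : Char) (xs ys : List Char) :
    fsp (itl (x :: xs) (y :: ys)) =
      ((if x ≠ ' ' then [x] else []) ++ (if y ≠ ' ' then [y] else [])) ++ fsp (itl xs ys) := by
  rw [itl, fsp_cons, fsp_cons]; simp

theorem fsp_itl_cons_nil (x : Char) (xs : List Char) :
    fsp (itl (x :: xs) []) = (if x ≠ ' ' then [x] else []) ++ fsp (itl xs []) := by
  rw [itl, fsp_cons]

theorem fsp_itl_nil_cons (y : Char) (ys : List Char) :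
    fsp (itl [] (y :: ys)) = (if y ≠ ' ' then [y] else []) ++ fsp (itl [] ys) := by
  rw [itl, fsp_cons]

-- B's fused loop, generalized over the running index
theorem loopB (l1 l2 : List Char) : ∀ (d k : ℕ) (acc : List Char),
    k + d = max l1.length l2.length →
    ((PySem.List.pyRange (k : Int) (max l1.length l2.length : ℕ) 1).foldl
      (fun (out : List Char) i =>
        let out :=
          if i < (l1.length : Int) then
            let c := PySem.List.pyGetD l1 i ' '
            if c ≠ ' ' then out ++ [c] else out
          else out
        if i < (l2.length : Int) then
          let c := PySem.List.pyGetD l2 i ' '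
          if c ≠ ' ' then out ++ [c] else out
        else out) acc)
      = acc ++ fsp (itl (l1.drop k) (l2.drop k)) := by
  intro d
  induction d with
  | zero =>
    intro k acc h
    rw [PySem.List.pyRange_one_eq_nil (by push_cast; omega)]
    have h1 : l1.drop k = [] := List.drop_eq_nil_of_le (by omega)
    have h2 : l2.drop k = [] := List.drop_eq_nil_of_le (by omega)
    rw [h1, h2]; simp [itl, fsp]
  | succ d ih =>
    intro k acc h
    rw [PySem.List.pyRange_one_cons (by push_cast; omega)]
    rw [List.foldl_cons]
    have hcast : (k : Int) + 1 = ((k + 1 : ℕ) : Int) := by push_cast; ring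
    rw [hcast, ih (k + 1) _ (by omega)]
    -- evaluate the body at index k and match it with the head of the filtered interleave
    by_cases h1 : k < l1.length <;> by_cases h2 : k < l2.length
    · rw [List.drop_eq_getElem_cons h1, List.drop_eq_getElem_cons h2, fsp_itl_cons_cons]
      have g1 : PySem.List.pyGetD l1 (k : Int) ' ' = l1[k] := by
        rw [PySem.List.pyGetD_natCast]; exact List.getD_eq_getElem l1 ' ' h1
      have g2 : PySem.List.pyGetD l2 (k : Int) ' ' = l2[k] := by
        rw [PySem.List.pyGetD_natCast]; exact List.getD_eq_getElem l2 ' ' h2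
      simp only [g1, g2, if_pos (by push_cast; omega : (k:Int) < (l1.length:Int)),
        if_pos (by push_cast; omega : (k:Int) < (l2.length:Int))]
      split <;> split <;> simp
    · have hd2 : l2.drop k = [] := List.drop_eq_nil_of_le (by omega)
      have hd2' : l2.drop (k + 1) = [] := List.drop_eq_nil_of_le (by omega)
      rw [List.drop_eq_getElem_cons h1, hd2, hd2', fsp_itl_cons_nil]
      have g1 : PySem.List.pyGetD l1 (k : Int) ' ' = l1[k] := by
        rw [PySem.List.pyGetD_natCast]; exact List.getD_eq_getElem l1 ' ' h1
      simp only [g1, if_pos (by push_cast; omega : (k:Int) < (l1.length:Int)),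
        if_neg (by push_cast; omega : ¬ (k:Int) < (l2.length:Int))]
      split <;> simp
    · have hd1 : l1.drop k = [] := List.drop_eq_nil_of_le (by omega)
      have hd1' : l1.drop (k + 1) = [] := List.drop_eq_nil_of_le (by omega)
      rw [List.drop_eq_getElem_cons h2, hd1, hd1', fsp_itl_nil_cons]
      have g2 : PySem.List.pyGetD l2 (k : Int) ' ' = l2[k] := by
        rw [PySem.List.pyGetD_natCast]; exact List.getD_eq_getElem l2 ' ' h2
      simp only [g2, if_neg (by push_cast; omega : ¬ (k:Int) < (l1.length:Int)),
        if_pos (by push_cast; omega : (k:Int) < (l2.length:Int))]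
      split <;> simp
    · omega

-- ===== VERDICT (by name: the statement is the Claim_ definition above) =====
theorem mezclar_spec : Claim_equal_mezclar := by
  intro cadena1 cadena2 _
  unfold Spec_mezclar mezclar mezclar_alt
  set l1 := cadena1.toList with hl1
  set l2 := cadena2.toList with hl2
  simp only []
  -- B side
  rw [show ((0 : Int)) = ((0 : ℕ) : Int) by norm_num,
    loopB l1 l2 (max l1.length l2.length) 0 [] (by omega)]
  simp only [List.drop_zero, List.nil_append]
  -- A side: filter pass
  rw [loopA]
  rw [PySem.List.foldl_append_ite_eq_filter]
  simp only [List.drop_zero, List.nil_append]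
  show String.mk (fsp _) = String.mk (fsp (itl l1 l2))
  congr 1
  -- case analysis on the padding
  by_cases hgt : (l1.length : Int) > (l2.length : Int)
  · rw [if_pos hgt, if_neg (by omega)]
    simpa using L2 l1 l2 0 (((l1.length : Int) - l2.length).toNat) (by omega) (Or.inl rfl)
  · by_cases hlt : (l1.length : Int) < (l2.length : Int)
    · rw [if_neg hgt, if_pos hlt]
      simpa using L2 l1 l2 (((l2.length : Int) - l1.length).toNat) 0 (by omega) (Or.inr rfl)
    · rw [if_neg hgt, if_neg hlt]
      simpa using L2 l1 l2 0 0 (by omega) (Or.inl rfl)
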